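-- pv_equiv track=rewrite | github.com/mathelai/github.io | imo2016p2/simulation.py | get_diagonals_type1
-- ===== SOURCE A (Python) =====
-- from typing import List, Dict, Tuple, Optional
--
-- def get_diagonals_type1(n: int) -> List[List[Tuple[int, int]]]:
--     """
--     Get all diagonals of type 1 (where i-j is constant).
--
--     Args:
--         n: Size of the grid
--
--     Returns:
--         List of diagonals, where each diagonal is a list of (i,j) coordinates
--     """
--     diagonals = []
--     # i-j ranges from -(n-1) to (n-1)
--     for diff in range(-(n-1), n):
--         diagonal = []
--         for i in range(n):
--             j = i - diff
--             if 0 <= j < n: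
--                 diagonal.append((i, j))
--         if diagonal:
--             diagonals.append(diagonal)
--     return diagonals
-- ===== SOURCE B (Python) =====
-- from typing import List, Tuple
--
-- def get_diagonals_type1(n: int) -> List[List[Tuple[int, int]]]:
--     """Bucket-index version: one pass over all cells groups each (i, j) into a
--     dict bucket keyed by its anti-diagonal value i - j; the diagonals are then
--     emitted in ascending key order."""
--     buckets = {}
--     for i in range(n):
--         for j in range(n):
--             buckets.setdefault(i - j, []).append((i, j))
--     return [buckets[d] for d in sorted(buckets)]
-- ===== Notes on version B (the rewrite author's own statement) =====
-- stated objective: alternative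
-- what changed: B replaces A's per-diagonal rescans of the whole i-range by a single pass over all cells that groups them into a dict of buckets keyed by i-j, then emits the buckets in sorted key order.
import Mathlib
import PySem

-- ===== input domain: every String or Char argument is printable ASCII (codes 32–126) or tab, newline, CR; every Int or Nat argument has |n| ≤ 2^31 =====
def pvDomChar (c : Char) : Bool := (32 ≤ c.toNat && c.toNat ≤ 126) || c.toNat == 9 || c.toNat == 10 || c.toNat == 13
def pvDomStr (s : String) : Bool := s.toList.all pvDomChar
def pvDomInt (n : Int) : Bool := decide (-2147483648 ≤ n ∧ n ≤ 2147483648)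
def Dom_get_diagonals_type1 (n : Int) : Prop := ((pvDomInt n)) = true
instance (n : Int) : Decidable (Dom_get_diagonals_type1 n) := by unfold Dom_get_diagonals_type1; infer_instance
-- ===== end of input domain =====

-- B replaces A's per-diagonal rescans of the i-range by one pass over all cells that
-- groups them into dict buckets keyed by i-j, emitted in sorted key order (objective: alternative).

-- ===== PORT A =====
def get_diagonals_type1 (n : Int) : List (List (Int × Int)) :=
  (PySem.List.pyRange (-(n - 1)) n).foldl (fun diagonals diff =>
    let diagonal := (PySem.List.pyRange 0 n).foldl (fun diagonal i =>
      let j := i - diff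
      if 0 ≤ j ∧ j < n then diagonal ++ [(i, j)] else diagonal) []
    if diagonal ≠ [] then diagonals ++ [diagonal] else diagonals) []

-- ===== PORT B =====
def get_diagonals_type1_alt (n : Int) : List (List (Int × Int)) :=
  let buckets := (PySem.List.pyRange 0 n).foldl (fun buckets i =>
    (PySem.List.pyRange 0 n).foldl (fun buckets j =>
      buckets.modify (i - j) [] (fun l => l ++ [(i, j)])) buckets)
    (PySem.Dict.empty : PySem.Dict Int (List (Int × Int)))
  (PySem.List.sorted buckets.keys (fun k => k) false).map (fun d => buckets.getD d [])

-- ===== PRECONDITION & SPEC =====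
def Spec_get_diagonals_type1 (n : Int) (out : List (List (Int × Int))) : Prop := out = get_diagonals_type1_alt n
instance (n : Int) (out : List (List (Int × Int))) : Decidable (Spec_get_diagonals_type1 n out) := by unfold Spec_get_diagonals_type1; infer_instance

-- ===== CLAIM (what is proved, stated in full; the proofs are below) =====
def Claim_equal_get_diagonals_type1 : Prop := ∀ (n : Int), Dom_get_diagonals_type1 n → Spec_get_diagonals_type1 n (get_diagonals_type1 n)

-- ===== LEMMAS AND PROOFS =====

-- the cells of the grid tagged with their anti-diagonal key, in B's traversal order
def pvCells (n : Int) : List (Int × (Int × Int)) :=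
  (PySem.List.pyRange 0 n).flatMap (fun i =>
    (PySem.List.pyRange 0 n).map (fun j => (i - j, (i, j))))

-- the diagonal for key d, in closed form (the common value both programs produce)
def pvDiag (n d : Int) : List (Int × Int) :=
  (PySem.List.pyRange (max 0 d) (min n (n + d))).map (fun i => (i, i - d))

-- B's bucket dict, named
def pvBuckets (n : Int) : PySem.Dict Int (List (Int × Int)) :=
  (PySem.List.pyRange 0 n).foldl (fun buckets i =>
    (PySem.List.pyRange 0 n).foldl (fun buckets j =>
      buckets.modify (i - j) [] (fun l => l ++ [(i, j)])) buckets) PySem.Dict.empty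

-- folding over a flatMap is the nested fold
lemma foldl_flatMap_eq {α β γ : Type} (l : List α) (g : α → List β) (f : γ → β → γ) :
    ∀ init : γ, (l.flatMap g).foldl f init = l.foldl (fun acc x => (g x).foldl f acc) init := by
  induction l with
  | nil => intro init; rfl
  | cons x t ih => intro init; simp [List.flatMap_cons, List.foldl_append, ih]

lemma buckets_eq_cells_fold (n : Int) :
    pvBuckets n = (pvCells n).foldl (fun d p => d.modify p.1 [] (fun l => l ++ [p.2])) PySem.Dict.empty := by
  rw [pvBuckets, pvCells, foldl_flatMap_eq]
  apply PySem.List.foldl_congr_mem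
  intro acc i _
  rw [List.foldl_map]

-- filtering a unit-step range by a lower and an upper bound yields the clipped range
lemma filter_pyRange_bounds (b lo hi : Int) : ∀ a : Int,
    (PySem.List.pyRange a b).filter (fun i => decide (lo ≤ i) && decide (i < hi))
      = PySem.List.pyRange (max a lo) (min b hi) := by
  intro a
  induction hk : (b - a).toNat generalizing a with
  | zero =>
    rw [PySem.List.pyRange_one_eq_nil (by omega), PySem.List.pyRange_one_eq_nil (by omega)]
    rfl
  | succ k ih =>
    have hab : a < b := by omega
    rw [PySem.List.pyRange_one_cons hab]
    by_cases hin : lo ≤ a ∧ a < hi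
    · have h1 : max a lo = a := by omega
      have h2 : a < min b hi := by omega
      rw [List.filter_cons_of_pos (by simp [hin.1, hin.2]), h1,
        PySem.List.pyRange_one_cons h2, ih (a + 1) (by omega)]
      have : max (a + 1) lo = a + 1 := by omega
      rw [this]
    · rw [List.filter_cons_of_neg (by simp; omega), ih (a + 1) (by omega)]
      rcases not_and_or.mp hin with h | h
      · have : max (a + 1) lo = max a lo := by omega
        rw [this]
      · rw [PySem.List.pyRange_one_eq_nil (by omega),
          PySem.List.pyRange_one_eq_nil (by omega)]

-- a single row's contribution to bucket c: at most the one cell (i, i-c)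
lemma row_filter (n c i : Int) :
    (((PySem.List.pyRange 0 n).map (fun j => (i - j, (i, j)))).filter
        (fun p => p.1 == c)).map (fun p => p.2)
      = if (decide (c ≤ i) && decide (i < n + c)) = true then [(i, i - c)] else [] := by
  rw [List.filter_map, List.map_map]
  have hcongr : (PySem.List.pyRange 0 n).filter
        ((fun p : Int × (Int × Int) => p.1 == c) ∘ (fun j => (i - j, (i, j))))
      = (PySem.List.pyRange 0 n).filter (fun j => decide (i - c ≤ j) && decide (j < i - c + 1)) := by
    apply List.filter_congr
    intro j _
    refine Bool.eq_iff_iff.mpr ?_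
    simp only [Function.comp_apply, beq_iff_eq, Bool.and_eq_true, decide_eq_true_eq]
    omega
  rw [hcongr, filter_pyRange_bounds]
  by_cases h : c ≤ i ∧ i < n + c
  · have h1 : max 0 (i - c) = i - c := by omega
    have h2 : min n (i - c + 1) = i - c + 1 := by omega
    rw [h1, h2, PySem.List.pyRange_one_cons (by omega),
      PySem.List.pyRange_one_eq_nil (by omega), if_pos (by simp [h.1, h.2])]
    simp
  · rw [PySem.List.pyRange_one_eq_nil (by omega), if_neg (by simp; omega)]
    rfl

-- each bucket holds exactly the closed-form diagonal of its key
lemma buckets_getD (n c : Int) : (pvBuckets n).getD c [] = pvDiag n c := by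
  rw [buckets_eq_cells_fold, PySem.Dict.getD_foldl_modify_append, pvCells,
    List.filter_flatMap, List.map_flatMap, PySem.Dict.getD_empty, List.nil_append]
  have hcells : (PySem.List.pyRange 0 n).flatMap (fun i =>
        (((PySem.List.pyRange 0 n).map (fun j => (i - j, (i, j)))).filter
          (fun p => p.1 == c)).map (fun p => p.2))
      = (PySem.List.pyRange 0 n).flatMap (fun i =>
        if (decide (c ≤ i) && decide (i < n + c)) = true then [(i, i - c)] else []) := by
    apply List.flatMap_congr
    intro i _
    exact row_filter n c i
  rw [hcells]
  have h1 : (PySem.List.pyRange 0 n).foldl (fun acc i =>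
        acc ++ (if (decide (c ≤ i) && decide (i < n + c)) = true then [(i, i - c)] else [])) []
      = [] ++ (PySem.List.pyRange 0 n).flatMap (fun i =>
        if (decide (c ≤ i) && decide (i < n + c)) = true then [(i, i - c)] else []) :=
    PySem.List.foldl_append_eq_flatMap _ _ _
  rw [List.nil_append] at h1
  rw [← h1]
  have h3 : (PySem.List.pyRange 0 n).foldl (fun acc i =>
        acc ++ (if (decide (c ≤ i) && decide (i < n + c)) = true then [(i, i - c)] else [])) []
      = (PySem.List.pyRange 0 n).foldl (fun acc i =>
        if (decide (c ≤ i) && decide (i < n + c)) = true then acc ++ [(i, i - c)] else acc) [] := by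
    apply PySem.List.foldl_congr_mem
    intro acc i _
    by_cases h : (decide (c ≤ i) && decide (i < n + c)) = true <;> simp [h]
  rw [h3, PySem.List.foldl_append_if, List.nil_append, filter_pyRange_bounds, pvDiag]

-- the keys of the bucket dict, as the set of anti-diagonal values in first-occurrence order
lemma buckets_keys (n : Int) : (pvBuckets n).keys = PySem.Set.ofList ((pvCells n).map (fun p => p.1)) := by
  rw [buckets_eq_cells_fold, PySem.Dict.keys_foldl_modify_key]
  simp [PySem.Set.update, PySem.Set.ofList_eq_foldl, PySem.Dict.keys_empty]

lemma mem_keys_iff (n a : Int) : a ∈ (pvBuckets n).keys ↔ (-(n - 1) ≤ a ∧ a < n) := by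
  rw [buckets_keys, PySem.Set.mem_ofList]
  simp only [pvCells, List.mem_map, List.mem_flatMap, PySem.List.mem_pyRange_one]
  constructor
  · rintro ⟨p, ⟨i, ⟨hi, j, hj, hp⟩⟩, ha⟩
    subst hp; simp at ha; omega
  · intro h
    refine ⟨(a, (max a 0, max a 0 - a)), ⟨max a 0, ⟨by omega, max a 0 - a, by omega, ?_⟩⟩, rfl⟩
    have hmax : max a 0 - (max a 0 - a) = a := by omega
    rw [hmax]

lemma pyRange_pairwise_lt (b : Int) : ∀ a : Int, (PySem.List.pyRange a b).Pairwise (· < ·) := by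
  intro a
  induction hk : (b - a).toNat generalizing a with
  | zero => rw [PySem.List.pyRange_one_eq_nil (by omega)]; exact List.Pairwise.nil
  | succ k ih =>
    rw [PySem.List.pyRange_one_cons (by omega)]
    refine List.Pairwise.cons ?_ (ih (a + 1) (by omega))
    intro x hx
    have := (PySem.List.mem_pyRange_one).mp hx
    omega

-- sorting the keys gives exactly A's diff-range
lemma sorted_keys (n : Int) :
    PySem.List.sorted (pvBuckets n).keys (fun k => k) false = PySem.List.pyRange (-(n - 1)) n := by
  apply PySem.List.sorted_eq_of_perm_of_pairwise_lt
  · rw [(List.perm_ext_iff_of_nodup ?_ ?_)]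
    · intro a
      rw [mem_keys_iff, PySem.List.mem_pyRange_one]
    · exact (pyRange_pairwise_lt n (-(n - 1))).imp (fun h => ne_of_lt h)
    · rw [buckets_keys]; exact PySem.Set.nodup_ofList _
  · exact pyRange_pairwise_lt n (-(n - 1))

-- A's inner row scan produces exactly the closed-form diagonal
lemma inner_eq (n d : Int) :
    (PySem.List.pyRange 0 n).foldl (fun diagonal i =>
        let j := i - d
        if 0 ≤ j ∧ j < n then diagonal ++ [(i, j)] else diagonal) []
      = pvDiag n d := by
  have h1 : (PySem.List.pyRange 0 n).foldl (fun diagonal i =>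
        let j := i - d
        if 0 ≤ j ∧ j < n then diagonal ++ [(i, j)] else diagonal) []
      = (PySem.List.pyRange 0 n).foldl (fun diagonal i =>
        if (decide (d ≤ i) && decide (i < n + d)) = true
        then diagonal ++ [(i, i - d)] else diagonal) [] := by
    apply PySem.List.foldl_congr_mem
    intro acc x _
    by_cases h : 0 ≤ x - d ∧ x - d < n
    · rw [if_pos h, if_pos (by simp; omega)]
    · rw [if_neg h, if_neg (by simp; omega)]
  rw [h1, PySem.List.foldl_append_if, filter_pyRange_bounds, List.nil_append, pvDiag]

lemma diag_ne_nil {n d : Int} (h1 : -(n - 1) ≤ d) (h2 : d < n) : pvDiag n d ≠ [] := by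
  rw [pvDiag, PySem.List.pyRange_one_cons (by omega)]
  simp

-- ===== VERDICT (by name: the statement is the Claim_ definition above) =====
theorem get_diagonals_type1_spec : Claim_equal_get_diagonals_type1 := by
  intro n _
  unfold Spec_get_diagonals_type1 get_diagonals_type1 get_diagonals_type1_alt
  have hA : (PySem.List.pyRange (-(n - 1)) n).foldl (fun diagonals diff =>
      let diagonal := (PySem.List.pyRange 0 n).foldl (fun diagonal i =>
        let j := i - diff
        if 0 ≤ j ∧ j < n then diagonal ++ [(i, j)] else diagonal) []
      if diagonal ≠ [] then diagonals ++ [diagonal] else diagonals) []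
    = (PySem.List.pyRange (-(n - 1)) n).foldl (fun diagonals d =>
        diagonals ++ [pvDiag n d]) [] := by
    apply PySem.List.foldl_congr_mem
    intro acc d hd
    have hm := (PySem.List.mem_pyRange_one).mp hd
    simp only [inner_eq n d]
    rw [if_pos (diag_ne_nil hm.1 hm.2)]
  rw [hA, PySem.List.foldl_append_singleton_eq_map, List.nil_append]
  show _ = (PySem.List.sorted (pvBuckets n).keys (fun k => k) false).map (fun d => (pvBuckets n).getD d [])
  rw [sorted_keys]
  apply List.map_congr_left
  intro d _
  rw [buckets_getD]
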